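-- pv_equiv track=rewrite | github.com/pinellolab/CRISPRme | PostProcess/merge_contiguous_targets.py | distribute_targets
-- ===== SOURCE A (Python) =====
-- from typing import List, Tuple, Dict, Callable
--
-- def update_target_fields(
--     target: List[str], fields: List[str], samplesidx: int, snpid_idx: int, afidx: int
-- ) -> List[str]:
--     """Update specified fields in the target list by appending corresponding
--     values from the fields list.
--
--     This function modifies the target list by concatenating values from the fields
--     list at given indices, which is useful for aggregating information related to
--     samples, SNP IDs, and allele frequencies.
--
--     Args:
--         target (List[str]): The list of target values to be updated.
--         fields (List[str]): The list of new values to append to the target.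
--         samplesidx (int): The index in the target list for sample information.
--         snpid_idx (int): The index in the target list for SNP ID information.
--         afidx (int): The index in the target list for allele frequency information.
--
--     Returns:
--         List[str]: The updated target list with concatenated values.
--     """
--
--     target[samplesidx] = f"{target[samplesidx]},{fields[samplesidx]}"
--     target[snpid_idx] = f"{target[snpid_idx]},{fields[snpid_idx]}"
--     target[afidx] = f"{target[afidx]},{fields[afidx]}"
--     return target
--
-- def distribute_targets(
--     cluster: List[str],
--     snpidx: int,
--     posidx: int,
--     snpid_idx: int,
--     samplesidx: int,
--     afidx: int,
-- ) -> Tuple[List[List[str]], Dict[str, List[List[str]]]]: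
--     """
--     Distributes targets between reference and variant targets from a given cluster.
--     It merges identical targets found in different datasets into a structured
--     format.
--
--     This function processes a list of target strings, categorizing them into
--     reference targets and variant targets based on specific indices. Reference
--     targets are collected in a list, while variant targets are stored in a dictionary,
--     allowing for the merging of identical targets across datasets.
--
--     Args:
--         cluster (List[str]): A list of target strings to be processed.
--         snpidx (int): The index indicating the SNP status of the target.
--         posidx (int): The index indicating the position of the target.
--         snpid_idx (int): The index for SNP IDs in the target fields.
--         samplesidx (int): The index for sample information in the target fields.
--         afidx (int): The index for allele frequencies in the target fields.
--
--     Returns: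
--         Tuple[List[List[str]], Dict[str, List[List[str]]]]: A tuple containing a
--             list of reference
--         targets and a dictionary of variant targets, where each key corresponds
--             to a unique target and its value is a list of associated target fields.
--
--     Raises:
--         ValueError: If the input data is malformed or indices are out of range.
--     """
--
--     # distribute targets between reference and variant targets
--     # dict used to merge identical targets found in different datasets
--     reftargets, vartargets = [], {}
--     for target in cluster:
--         fields = target.strip().split()  # retrieve target fields
--         if fields[snpidx] == "n":  # target found in reference
--             reftargets.append(fields)
--         else:  # target found in variant genomes
--             targetkey = f"{fields[posidx]}_{fields[snpidx]}"
--             current_target = vartargets.get(targetkey)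
--             if current_target:
--                 # update current sample list, snp ids, and allele freqs
--                 vartargets[targetkey][0] = update_target_fields(
--                     current_target[0], fields, samplesidx, snpid_idx, afidx
--                 )
--             else:
--                 vartargets[targetkey] = [fields]  # first target at position
--     return reftargets, vartargets
-- ===== SOURCE B (Python) =====
-- def distribute_targets(cluster, snpidx, posidx, snpid_idx, samplesidx, afidx):
--     # pass 1: split rows; collect reference rows, and group variant rows by key
--     reftargets = []
--     groups = {}
--     for target in cluster:
--         fields = target.strip().split()
--         if fields[snpidx] == "n":
--             reftargets.append(fields)
--         else:
--             key = f"{fields[posidx]}_{fields[snpidx]}"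
--             groups[key] = groups.get(key, []) + [fields]
--     # pass 2: fold each group into one merged row
--     vartargets = {}
--     for key, members in groups.items():
--         merged = list(members[0])
--         for fields in members[1:]:
--             for idx in (samplesidx, snpid_idx, afidx):
--                 merged[idx] = f"{merged[idx]},{fields[idx]}"
--         vartargets[key] = [merged]
--     return reftargets, vartargets
-- ===== Notes on version B (the rewrite author's own statement) =====
-- stated objective: alternative
-- what changed: B replaces A's incremental merge-on-the-fly (dict.get then string-concatenate into the stored row at every repeated key) by a two-pass scheme: first group the variant rows into a dict of member lists, then fold each group's bucket into one merged row.
import Mathlib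
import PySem

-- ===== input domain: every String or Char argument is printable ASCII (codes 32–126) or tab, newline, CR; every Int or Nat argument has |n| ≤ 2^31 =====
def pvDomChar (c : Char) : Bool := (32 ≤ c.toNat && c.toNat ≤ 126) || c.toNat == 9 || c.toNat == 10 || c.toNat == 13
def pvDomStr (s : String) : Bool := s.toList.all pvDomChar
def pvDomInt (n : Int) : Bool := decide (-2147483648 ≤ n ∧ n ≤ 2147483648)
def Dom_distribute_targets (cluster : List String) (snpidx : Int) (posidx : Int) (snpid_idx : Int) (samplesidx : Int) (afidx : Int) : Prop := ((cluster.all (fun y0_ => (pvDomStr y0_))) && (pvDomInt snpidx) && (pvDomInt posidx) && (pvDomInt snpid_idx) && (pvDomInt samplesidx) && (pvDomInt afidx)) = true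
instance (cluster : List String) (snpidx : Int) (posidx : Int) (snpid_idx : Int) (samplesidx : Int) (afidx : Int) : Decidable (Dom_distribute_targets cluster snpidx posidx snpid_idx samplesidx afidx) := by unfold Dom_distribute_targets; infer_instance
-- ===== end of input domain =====

-- B replaces A's incremental merge-during-scan by a two-pass grouping (bucket dict first, then fold each bucket); same cost, alternative structure; return-value equivalence only (A mutates only lists it created itself).


-- ===== PORT A =====
-- fields = target.strip().split()   (shared: both Pythons compute this literally)
def pvFieldsOf (t : String) : List String := PySem.Str.split₀ (PySem.Str.strip t)

-- f"{fields[posidx]}_{fields[snpidx]}"   (shared key expression)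
def pvKeyOf (posidx snpidx : Int) (f : List String) : String :=
  PySem.List.pyGetD f posidx "" ++ "_" ++ PySem.List.pyGetD f snpidx ""

def update_target_fields (target fields : List String) (samplesidx snpid_idx afidx : Int) : List String :=
  let t1 := PySem.List.pySetD target samplesidx
    (PySem.List.pyGetD target samplesidx "" ++ "," ++ PySem.List.pyGetD fields samplesidx "")
  let t2 := PySem.List.pySetD t1 snpid_idx
    (PySem.List.pyGetD t1 snpid_idx "" ++ "," ++ PySem.List.pyGetD fields snpid_idx "")
  PySem.List.pySetD t2 afidx
    (PySem.List.pyGetD t2 afidx "" ++ "," ++ PySem.List.pyGetD fields afidx "")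

-- one iteration of A's loop over cluster
def pvStepA (snpidx posidx snpid_idx samplesidx afidx : Int)
    (acc : List (List String) × PySem.Dict String (List (List String))) (target : String) :
    List (List String) × PySem.Dict String (List (List String)) :=
  let fields := pvFieldsOf target
  if PySem.List.pyGetD fields snpidx "" == "n" then
    (acc.1 ++ [fields], acc.2)
  else
    let targetkey := pvKeyOf posidx snpidx fields
    let current_target := (acc.2.get? targetkey).getD []
    if current_target.isEmpty then
      (acc.1, acc.2.insert targetkey [fields])
    else
      (acc.1, acc.2.insert targetkey
        (PySem.List.pySetD current_target 0
          (update_target_fields (PySem.List.pyGetD current_target 0 []) fields samplesidx snpid_idx afidx)))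

def distribute_targets (cluster : List String) (snpidx : Int) (posidx : Int) (snpid_idx : Int) (samplesidx : Int) (afidx : Int) : List (List String) × (List (String × List (List String))) :=
  let st := cluster.foldl (pvStepA snpidx posidx snpid_idx samplesidx afidx)
    (([] : List (List String)), (PySem.Dict.empty : PySem.Dict String (List (List String))))
  (st.1, st.2.items)

-- ===== PORT B =====
-- inner 'for idx in (samplesidx, snpid_idx, afidx): merged[idx] = f"{merged[idx]},{fields[idx]}"'
def pvMergeRow (samplesidx snpid_idx afidx : Int) (merged fields : List String) : List String :=
  [samplesidx, snpid_idx, afidx].foldl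
    (fun m idx => PySem.List.pySetD m idx
      (PySem.List.pyGetD m idx "" ++ "," ++ PySem.List.pyGetD fields idx "")) merged

-- 'merged = list(members[0]); for fields in members[1:]: …'
def pvMergeGroup (samplesidx snpid_idx afidx : Int) (members : List (List String)) : List String :=
  (PySem.List.slice members (some 1) none).foldl (pvMergeRow samplesidx snpid_idx afidx)
    (PySem.List.pyGetD members 0 [])

-- one iteration of B's first pass: groups[key] = groups.get(key, []) + [fields]
def pvStepB (snpidx posidx : Int)
    (acc : List (List String) × PySem.Dict String (List (List String))) (target : String) :
    List (List String) × PySem.Dict String (List (List String)) :=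
  let fields := pvFieldsOf target
  if PySem.List.pyGetD fields snpidx "" == "n" then
    (acc.1 ++ [fields], acc.2)
  else
    let key := pvKeyOf posidx snpidx fields
    (acc.1, acc.2.insert key (acc.2.getD key [] ++ [fields]))

def distribute_targets_alt (cluster : List String) (snpidx : Int) (posidx : Int) (snpid_idx : Int) (samplesidx : Int) (afidx : Int) : List (List String) × (List (String × List (List String))) :=
  let st := cluster.foldl (pvStepB snpidx posidx)
    (([] : List (List String)), (PySem.Dict.empty : PySem.Dict String (List (List String))))
  let vartargets := st.2.items.foldl
    (fun d p => d.insert p.1 [pvMergeGroup samplesidx snpid_idx afidx p.2])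
    (PySem.Dict.empty : PySem.Dict String (List (List String)))
  (st.1, vartargets.items)

-- ===== PRECONDITION & SPEC =====
-- Pre_ is exactly where Python A returns normally: every row needs fields[snpidx] in range;
-- variant rows additionally need posidx in range, and — only when their key group has a second
-- member, so a merge actually happens — samplesidx/snpid_idx/afidx in range; otherwise IndexError.
def Pre_distribute_targets (cluster : List String) (snpidx : Int) (posidx : Int) (snpid_idx : Int) (samplesidx : Int) (afidx : Int) : Prop :=
  ∀ f ∈ cluster.map pvFieldsOf,
    PySem.Raise.InRange f.length snpidx ∧
    (PySem.List.pyGetD f snpidx "" ≠ "n" →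
      PySem.Raise.InRange f.length posidx ∧
      (2 ≤ ((cluster.map pvFieldsOf).filter (fun g =>
              !(PySem.List.pyGetD g snpidx "" == "n") &&
              (pvKeyOf posidx snpidx g == pvKeyOf posidx snpidx f))).length →
        PySem.Raise.InRange f.length samplesidx ∧ PySem.Raise.InRange f.length snpid_idx ∧
        PySem.Raise.InRange f.length afidx))
instance (cluster : List String) (snpidx : Int) (posidx : Int) (snpid_idx : Int) (samplesidx : Int) (afidx : Int) : Decidable (Pre_distribute_targets cluster snpidx posidx snpid_idx samplesidx afidx) := by unfold Pre_distribute_targets; infer_instance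

def pvWitness_distribute_targets : List String × Int × Int × Int × Int × Int :=
  (["n", "0 x"], 0, 0, 1, 1, 1)

def Spec_distribute_targets (cluster : List String) (snpidx : Int) (posidx : Int) (snpid_idx : Int) (samplesidx : Int) (afidx : Int) (out : List (List String) × (List (String × List (List String)))) : Prop := out = distribute_targets_alt cluster snpidx posidx snpid_idx samplesidx afidx
instance (cluster : List String) (snpidx : Int) (posidx : Int) (snpid_idx : Int) (samplesidx : Int) (afidx : Int) (out : List (List String) × (List (String × List (List String)))) : Decidable (Spec_distribute_targets cluster snpidx posidx snpid_idx samplesidx afidx out) := by unfold Spec_distribute_targets; infer_instance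

-- ===== CLAIM (what is proved, stated in full; the proofs are below) =====
def Claim_equal_distribute_targets : Prop := ∀ (cluster : List String) (snpidx : Int) (posidx : Int) (snpid_idx : Int) (samplesidx : Int) (afidx : Int), Dom_distribute_targets cluster snpidx posidx snpid_idx samplesidx afidx → Pre_distribute_targets cluster snpidx posidx snpid_idx samplesidx afidx → Spec_distribute_targets cluster snpidx posidx snpid_idx samplesidx afidx (distribute_targets cluster snpidx posidx snpid_idx samplesidx afidx)

-- ===== LEMMAS AND PROOFS =====

-- the bucket-to-merged-value translation
def pvPhi (samplesidx snpid_idx afidx : Int) (p : String × List (List String)) :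
    String × List (List String) :=
  (p.1, [pvMergeGroup samplesidx snpid_idx afidx p.2])

theorem pvMergeRow_eq_update (s i a : Int) (m f : List String) :
    pvMergeRow s i a m f = update_target_fields m f s i a := by
  simp [pvMergeRow, update_target_fields, List.foldl]

theorem pvMergeGroup_singleton (s i a : Int) (f : List String) :
    pvMergeGroup s i a [f] = f := by
  simp [pvMergeGroup, PySem.List.slice_from_one, PySem.List.pyGetD_zero_cons]

theorem pvMergeGroup_append (s i a : Int) (ms : List (List String)) (f : List String)
    (h : ms ≠ []) :
    pvMergeGroup s i a (ms ++ [f]) = pvMergeRow s i a (pvMergeGroup s i a ms) f := by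
  obtain ⟨m0, rest, rfl⟩ : ∃ m0 rest, ms = m0 :: rest := by
    cases ms with
    | nil => exact absurd rfl h
    | cons x xs => exact ⟨x, xs, rfl⟩
  simp [pvMergeGroup, PySem.List.slice_from_one, PySem.List.pyGetD_zero_cons]

theorem pvGet?_mk_map (s i a : Int) (l : List (String × List (List String))) (k : String) :
    (PySem.Dict.mk (l.map (pvPhi s i a))).get? k
      = ((PySem.Dict.mk l).get? k).map (fun ms => [pvMergeGroup s i a ms]) := by
  induction l with
  | nil => simp [PySem.Dict.get?]
  | cons p rest ih =>
    obtain ⟨k0, v0⟩ := p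
    simp only [List.map_cons, pvPhi, PySem.Dict.get?_mk_cons]
    by_cases hk : k0 == k
    · simp [hk]
    · simp [hk, ih]

theorem pvItemsFoldInsert (s i a : Int) (l : List (String × List (List String)))
    (d : PySem.Dict String (List (List String)))
    (hfresh : ∀ p ∈ l, d.contains p.1 = false) (hnd : (l.map (·.1)).Nodup) :
    (l.foldl (fun d p => d.insert p.1 [pvMergeGroup s i a p.2]) d).items
      = d.items ++ l.map (pvPhi s i a) := by
  induction l generalizing d with
  | nil => simp
  | cons p rest ih =>
    simp only [List.foldl_cons, List.map_cons]
    rw [ih]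
    · rw [PySem.Dict.items_insert_of_not_contains _ _ (hfresh p (by simp))]
      simp [pvPhi]
    · intro q hq
      rw [PySem.Dict.contains_insert]
      have hq1 : q.1 ≠ p.1 := by
        intro hqeq
        have : p.1 ∈ rest.map (·.1) := hqeq ▸ List.mem_map_of_mem hq
        exact (List.nodup_cons.mp hnd).1 this
      simp [hq1, hfresh q (by simp [hq])]
    · exact (List.nodup_cons.mp hnd).2

theorem pvGet?_map (s i a : Int) (g : PySem.Dict String (List (List String))) (k : String) :
    (PySem.Dict.mk (g.items.map (pvPhi s i a))).get? k
      = (g.get? k).map (fun ms => [pvMergeGroup s i a ms]) :=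
  pvGet?_mk_map s i a g.items k

-- main invariant: running A's loop on the φ-image of B's grouping dict tracks B's loop
theorem pvFoldRel (snpidx posidx i s a : Int) (cl : List String)
    (ref : List (List String)) (g : PySem.Dict String (List (List String)))
    (hnd : g.keys.Nodup) (hne : ∀ p ∈ g.items, p.2 ≠ []) :
    cl.foldl (pvStepA snpidx posidx i s a) (ref, PySem.Dict.mk (g.items.map (pvPhi s i a)))
        = ((cl.foldl (pvStepB snpidx posidx) (ref, g)).1,
           PySem.Dict.mk ((cl.foldl (pvStepB snpidx posidx) (ref, g)).2.items.map (pvPhi s i a)))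
      ∧ (cl.foldl (pvStepB snpidx posidx) (ref, g)).2.keys.Nodup
      ∧ ∀ p ∈ (cl.foldl (pvStepB snpidx posidx) (ref, g)).2.items, p.2 ≠ [] := by
  induction cl generalizing ref g with
  | nil => exact ⟨rfl, hnd, hne⟩
  | cons t rest ih =>
    simp only [List.foldl_cons]
    by_cases hn : PySem.List.pyGetD (pvFieldsOf t) snpidx "" == "n"
    · have hA : pvStepA snpidx posidx i s a (ref, PySem.Dict.mk (g.items.map (pvPhi s i a))) t
          = (ref ++ [pvFieldsOf t], PySem.Dict.mk (g.items.map (pvPhi s i a))) := by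
        simp [pvStepA, hn]
      have hB : pvStepB snpidx posidx (ref, g) t = (ref ++ [pvFieldsOf t], g) := by
        simp [pvStepB, hn]
      rw [hA, hB]
      exact ih _ _ hnd hne
    · -- variant row
      set k := pvKeyOf posidx snpidx (pvFieldsOf t) with hkdef
      have hB : pvStepB snpidx posidx (ref, g) t
          = (ref, g.insert k (g.getD k [] ++ [pvFieldsOf t])) := by
        simp [pvStepB, hn, hkdef]
      cases hget : g.get? k with
      | none =>
        -- fresh key: both append
        have hgd : g.getD k [] = [] := PySem.Dict.getD_of_get?_eq_none _ _ hget
        have hcontains : g.contains k = false := by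
          rw [PySem.Dict.contains_eq_isSome_get?, hget]; rfl
        have hA : pvStepA snpidx posidx i s a (ref, PySem.Dict.mk (g.items.map (pvPhi s i a))) t
            = (ref, (PySem.Dict.mk (g.items.map (pvPhi s i a))).insert k [pvFieldsOf t]) := by
          simp [pvStepA, hn, pvGet?_map, ← hkdef, hget]
        have hknot : k ∉ g.keys := by
          rw [← PySem.Dict.get?_eq_none_iff_not_mem_keys]; exact hget
        have hcontains' : (PySem.Dict.mk (g.items.map (pvPhi s i a))).contains k = false := by
          rw [PySem.Dict.contains_eq_isSome_get?, pvGet?_map, hget]; rfl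
        have hdicts : (PySem.Dict.mk (g.items.map (pvPhi s i a))).insert k [pvFieldsOf t]
            = PySem.Dict.mk ((g.insert k ([] ++ [pvFieldsOf t])).items.map (pvPhi s i a)) := by
          apply PySem.Dict.ext
          rw [PySem.Dict.items_insert_of_not_contains _ _ hcontains',
              PySem.Dict.items_insert_of_not_contains _ _ hcontains]
          simp [pvPhi, pvMergeGroup_singleton]
        rw [hA, hB, hgd, hdicts]
        apply ih
        · rw [PySem.Dict.keys_insert_of_not_contains _ _ hcontains]
          simpa using List.Nodup.append hnd (List.nodup_singleton k) (by simpa using hknot)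
        · intro p hp
          rcases (PySem.Dict.mem_items_insert _ _ _ _).mp hp with h1 | h2
          · subst h1; simp
          · exact hne _ h2.1
      | some ms =>
        have hmsne : ms ≠ [] := hne _ (PySem.Dict.mem_items_of_get?_eq_some _ hget)
        have hgd : g.getD k [] = ms := PySem.Dict.getD_of_get?_eq_some _ _ hget
        have hcontains : g.contains k = true := by
          rw [PySem.Dict.contains_eq_isSome_get?, hget]; rfl
        have hcontains' : (PySem.Dict.mk (g.items.map (pvPhi s i a))).contains k = true := by
          rw [PySem.Dict.contains_eq_isSome_get?, pvGet?_map, hget]; rfl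
        have hA : pvStepA snpidx posidx i s a (ref, PySem.Dict.mk (g.items.map (pvPhi s i a))) t
            = (ref, (PySem.Dict.mk (g.items.map (pvPhi s i a))).insert k
                [update_target_fields (pvMergeGroup s i a ms) (pvFieldsOf t) s i a]) := by
          simp [pvStepA, hn, pvGet?_map, ← hkdef, hget, PySem.List.pyGetD_zero_cons, PySem.List.pySetD_of_nonneg]
        have hdicts : (PySem.Dict.mk (g.items.map (pvPhi s i a))).insert k
              [update_target_fields (pvMergeGroup s i a ms) (pvFieldsOf t) s i a]
            = PySem.Dict.mk ((g.insert k (ms ++ [pvFieldsOf t])).items.map (pvPhi s i a)) := by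
          apply PySem.Dict.ext
          rw [PySem.Dict.items_insert_of_contains _ _ hcontains',
              PySem.Dict.items_insert_of_contains _ _ hcontains]
          simp only [List.map_map]
          apply List.map_congr_left
          intro p hp
          by_cases hpk : p.1 == k
          · have hpkeq : p.1 = k := by simpa using hpk
            have : g.get? p.1 = some p.2 := PySem.Dict.get?_of_mem_items _ hp hnd
            rw [hpkeq, hget] at this
            have hpms : p.2 = ms := by injection this.symm
            simp [Function.comp, pvPhi, hpk, hpms,
              pvMergeGroup_append s i a ms _ hmsne, pvMergeRow_eq_update]
          · simp [Function.comp, pvPhi, hpk]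
        rw [hA, hB, hgd, hdicts]
        apply ih
        · rw [PySem.Dict.keys_insert_of_contains _ _ hcontains]; exact hnd
        · intro p hp
          rcases (PySem.Dict.mem_items_insert _ _ _ _).mp hp with h1 | h2
          · subst h1; simp
          · exact hne _ h2.1

-- ===== VERDICT (by name: the statement is the Claim_ definition above) =====
theorem distribute_targets_spec : Claim_equal_distribute_targets := by
  intro cluster snpidx posidx snpid_idx samplesidx afidx _ _
  unfold Spec_distribute_targets distribute_targets distribute_targets_alt
  dsimp only
  obtain ⟨heq, hnd, -⟩ := pvFoldRel snpidx posidx snpid_idx samplesidx afidx cluster []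
    PySem.Dict.empty (by simp [PySem.Dict.keys, PySem.Dict.empty])
    (by simp [PySem.Dict.empty])
  have h0 : PySem.Dict.mk ((PySem.Dict.empty : PySem.Dict String (List (List String))).items.map
        (pvPhi samplesidx snpid_idx afidx))
      = (PySem.Dict.empty : PySem.Dict String (List (List String))) := by
    apply PySem.Dict.ext; simp [PySem.Dict.empty]
  rw [h0] at heq
  rw [heq]
  congr 1
  rw [pvItemsFoldInsert samplesidx snpid_idx afidx _ _
        (fun p _ => PySem.Dict.contains_empty _)
        (by simpa [PySem.Dict.keys] using hnd)]
  simp [PySem.Dict.empty]
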